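-- pv_equiv track=rewrite | github.com/scatterdayassociates/kataly_holding | sankey-test-8.py | style_sankey_nodes
-- ===== SOURCE A (Python) =====
-- def style_sankey_nodes(node_list, sector):
--     colors = ["blue", "green", "orange", "red"]  # Colors for each level
--     node_colors = []
--
--     # Sector level
--     node_colors.append(colors[0])
--
--     # Harm Typology level
--     harm_typologies = node_list[1:len(node_list)//3 + 1]
--     for _ in harm_typologies:
--         node_colors.append(colors[1])
--
--     # SDH Category level
--     sdh_categories = node_list[len(node_list)//3 + 1:2*len(node_list)//3 + 1]
--     for _ in sdh_categories:
--         node_colors.append(colors[2])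
--
--     # SDH Indicator level
--     sdh_indicators = node_list[2*len(node_list)//3 + 1:]
--     for _ in sdh_indicators:
--         node_colors.append(colors[3])
--
--     return node_colors
-- ===== SOURCE B (Python) =====
-- def style_sankey_nodes(node_list, sector):
--     colors = ["blue", "green", "orange", "red"]
--     n = len(node_list)
--     t1 = n // 3 + 1
--     t2 = 2 * n // 3 + 1
--     node_colors = [colors[0]]
--     for i in range(1, n):
--         if i < t1:
--             node_colors.append(colors[1])
--         elif i < t2:
--             node_colors.append(colors[2])
--         else:
--             node_colors.append(colors[3])
--     return node_colors
-- ===== Notes on version B (the rewrite author's own statement) =====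
-- stated objective: simpler
-- what changed: Replaces the three slice-then-loop segments with one index-classifying pass over range(1, n) using precomputed thresholds n//3+1 and 2*n//3+1, so no slice lists are materialized.
import Mathlib
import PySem

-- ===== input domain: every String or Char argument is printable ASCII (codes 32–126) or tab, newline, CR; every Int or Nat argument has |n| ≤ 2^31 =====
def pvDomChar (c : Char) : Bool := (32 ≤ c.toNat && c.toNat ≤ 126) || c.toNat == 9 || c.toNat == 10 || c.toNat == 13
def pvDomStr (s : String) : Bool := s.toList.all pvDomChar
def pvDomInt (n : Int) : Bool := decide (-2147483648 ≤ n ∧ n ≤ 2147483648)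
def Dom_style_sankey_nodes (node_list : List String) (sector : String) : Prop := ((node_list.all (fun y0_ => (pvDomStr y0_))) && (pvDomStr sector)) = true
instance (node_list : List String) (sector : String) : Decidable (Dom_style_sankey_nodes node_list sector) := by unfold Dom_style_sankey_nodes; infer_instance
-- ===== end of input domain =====

-- B replaces A's three slice-then-loop segments by one index-classifying pass; objective: simpler.

-- ===== PORT A =====
def style_sankey_nodes (node_list : List String) (sector : String) : List String :=
  let colors : List String := ["blue", "green", "orange", "red"]
  let node_colors : List String := []
  -- node_colors.append(colors[0])
  let node_colors := node_colors ++ [PySem.List.pyGetD colors 0 ""]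
  let n : Int := node_list.length
  -- harm_typologies = node_list[1 : len(node_list)//3 + 1]
  let harm_typologies := PySem.List.slice node_list (some 1) (some (PySem.Int.floordiv n 3 + 1))
  let node_colors := harm_typologies.foldl (fun acc _ => acc ++ [PySem.List.pyGetD colors 1 ""]) node_colors
  -- sdh_categories = node_list[len//3 + 1 : 2*len//3 + 1]
  let sdh_categories := PySem.List.slice node_list (some (PySem.Int.floordiv n 3 + 1)) (some (PySem.Int.floordiv (2 * n) 3 + 1))
  let node_colors := sdh_categories.foldl (fun acc _ => acc ++ [PySem.List.pyGetD colors 2 ""]) node_colors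
  -- sdh_indicators = node_list[2*len//3 + 1 :]
  let sdh_indicators := PySem.List.slice node_list (some (PySem.Int.floordiv (2 * n) 3 + 1)) none
  let node_colors := sdh_indicators.foldl (fun acc _ => acc ++ [PySem.List.pyGetD colors 3 ""]) node_colors
  node_colors

-- ===== PORT B =====
def style_sankey_nodes_alt (node_list : List String) (sector : String) : List String :=
  let colors : List String := ["blue", "green", "orange", "red"]
  let n : Int := node_list.length
  let t1 : Int := PySem.Int.floordiv n 3 + 1
  let t2 : Int := PySem.Int.floordiv (2 * n) 3 + 1
  let node_colors : List String := [PySem.List.pyGetD colors 0 ""]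
  (PySem.List.pyRange 1 n 1).foldl (fun acc i =>
    if i < t1 then acc ++ [PySem.List.pyGetD colors 1 ""]
    else if i < t2 then acc ++ [PySem.List.pyGetD colors 2 ""]
    else acc ++ [PySem.List.pyGetD colors 3 ""]) node_colors

-- ===== PRECONDITION & SPEC =====
def Spec_style_sankey_nodes (node_list : List String) (sector : String) (out : List String) : Prop := out = style_sankey_nodes_alt node_list sector
instance (node_list : List String) (sector : String) (out : List String) : Decidable (Spec_style_sankey_nodes node_list sector out) := by unfold Spec_style_sankey_nodes; infer_instance

-- ===== CLAIM (what is proved, stated in full; the proofs are below) =====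
def Claim_equal_style_sankey_nodes : Prop := ∀ (node_list : List String) (sector : String), Dom_style_sankey_nodes node_list sector → Spec_style_sankey_nodes node_list sector (style_sankey_nodes node_list sector)

-- ===== LEMMAS AND PROOFS =====

-- each segment of B's range maps to a constant color, so it is a replicate
theorem map_range_const {α : Type} (a b : Int) (f : Int → α) (c : α)
    (h : ∀ x, a ≤ x → x < b → f x = c) :
    (PySem.List.pyRange a b 1).map f = List.replicate (b - a).toNat c := by
  have h1 : (PySem.List.pyRange a b 1).map f = (PySem.List.pyRange a b 1).map (fun _ => c) := by
    apply List.map_congr_left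
    intro x hx
    rw [PySem.List.mem_pyRange_one] at hx
    exact h x hx.1 hx.2
  rw [h1, List.map_const', PySem.List.length_pyRange_one]

theorem style_sankey_nodes_spec : Claim_equal_style_sankey_nodes := by
  intro node_list sector _
  unfold Spec_style_sankey_nodes style_sankey_nodes style_sankey_nodes_alt
  simp only []
  set nn := node_list.length with hnn
  have hfd1 : PySem.Int.floordiv (nn : Int) 3 = ((nn / 3 : Nat) : Int) := by
    exact_mod_cast PySem.Int.floordiv_natCast nn 3
  have hfd2 : PySem.Int.floordiv (2 * (nn : Int)) 3 = ((2 * nn / 3 : Nat) : Int) := by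
    have : (2 * (nn : Int)) = ((2 * nn : Nat) : Int) := by push_cast; ring
    rw [this]
    exact_mod_cast PySem.Int.floordiv_natCast (2 * nn) 3
  -- A side: each foldl appends a constant, so it is acc ++ replicate (segment length)
  rw [PySem.List.foldl_append_singleton_eq_map, PySem.List.foldl_append_singleton_eq_map,
      PySem.List.foldl_append_singleton_eq_map]
  rw [List.map_const', List.map_const', List.map_const']
  -- slice lengths
  rw [hfd1, hfd2]
  have hs1 : PySem.List.slice node_list (some (1 : Int)) (some (((nn / 3 : Nat) : Int) + 1)) =
      (node_list.drop 1).take (nn / 3 + 1 - 1) := by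
    have h1 : (((nn / 3 : Nat) : Int) + 1) = ((nn / 3 + 1 : Nat) : Int) := by push_cast; ring
    have h0 : ((1 : Int)) = ((1 : Nat) : Int) := by norm_cast
    rw [h1, h0, PySem.List.slice_natCast]
  have hs2 : PySem.List.slice node_list (some (((nn / 3 : Nat) : Int) + 1)) (some (((2 * nn / 3 : Nat) : Int) + 1)) =
      (node_list.drop (nn / 3 + 1)).take (2 * nn / 3 + 1 - (nn / 3 + 1)) := by
    have h1 : (((nn / 3 : Nat) : Int) + 1) = ((nn / 3 + 1 : Nat) : Int) := by push_cast; ring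
    have h2 : (((2 * nn / 3 : Nat) : Int) + 1) = ((2 * nn / 3 + 1 : Nat) : Int) := by push_cast; ring
    rw [h1, h2, PySem.List.slice_natCast]
  have hs3 : PySem.List.slice node_list (some (((2 * nn / 3 : Nat) : Int) + 1)) none =
      node_list.drop (2 * nn / 3 + 1) := by
    have h2 : (((2 * nn / 3 : Nat) : Int) + 1) = ((2 * nn / 3 + 1 : Nat) : Int) := by push_cast; ring
    rw [h2, PySem.List.slice_from_natCast]
  rw [hs1, hs2, hs3]
  simp only [List.length_take, List.length_drop, ← hnn]
  -- B side: rewrite the branchy append as appending a branchy singleton, then fold = map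
  have hbody : (fun (acc : List String) (i : Int) =>
      if i < ((nn / 3 : Nat) : Int) + 1 then acc ++ [PySem.List.pyGetD ["blue", "green", "orange", "red"] 1 ""]
      else if i < ((2 * nn / 3 : Nat) : Int) + 1 then acc ++ [PySem.List.pyGetD ["blue", "green", "orange", "red"] 2 ""]
      else acc ++ [PySem.List.pyGetD ["blue", "green", "orange", "red"] 3 ""]) =
      (fun (acc : List String) (i : Int) => acc ++
        [if i < ((nn / 3 : Nat) : Int) + 1 then PySem.List.pyGetD ["blue", "green", "orange", "red"] 1 ""
         else if i < ((2 * nn / 3 : Nat) : Int) + 1 then PySem.List.pyGetD ["blue", "green", "orange", "red"] 2 ""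
         else PySem.List.pyGetD ["blue", "green", "orange", "red"] 3 ""]) := by
    funext acc i; split_ifs <;> rfl
  rw [hbody, PySem.List.foldl_append_singleton_eq_map]
  -- split B's range at the two thresholds (or it is empty when nn = 0)
  by_cases h0 : nn = 0
  · rw [PySem.List.pyRange_one_eq_nil (by omega)]
    simp [h0]
  · have hnn1 : 1 ≤ nn := Nat.one_le_iff_ne_zero.mpr h0
    have hb1 : (1 : Int) ≤ ((nn / 3 : Nat) : Int) + 1 := by omega
    have hb2 : ((nn / 3 : Nat) : Int) + 1 ≤ ((2 * nn / 3 : Nat) : Int) + 1 := by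
      have : nn / 3 ≤ 2 * nn / 3 := Nat.div_le_div_right (by omega)
      omega
    have hb3 : ((2 * nn / 3 : Nat) : Int) + 1 ≤ (nn : Int) := by
      have : 2 * nn / 3 < nn := by omega
      omega
    rw [PySem.List.pyRange_one_append 1 (((nn / 3 : Nat) : Int) + 1) (nn : Int) hb1 (le_trans hb2 hb3),
        PySem.List.pyRange_one_append (((nn / 3 : Nat) : Int) + 1) (((2 * nn / 3 : Nat) : Int) + 1) (nn : Int) hb2 hb3]
    rw [List.map_append, List.map_append]
    rw [map_range_const _ _ _ (PySem.List.pyGetD ["blue", "green", "orange", "red"] 1 "")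
        (by intro x _ hx; simp only [if_pos hx]),
        map_range_const _ _ _ (PySem.List.pyGetD ["blue", "green", "orange", "red"] 2 "")
        (by intro x hxa hxb; rw [if_neg (by omega), if_pos hxb]),
        map_range_const _ _ _ (PySem.List.pyGetD ["blue", "green", "orange", "red"] 3 "")
        (by intro x hxa _; rw [if_neg (by omega), if_neg (by omega)])]
    -- now both sides are blue :: replicates; lengths agree by arithmetic
    have e1 : min (nn / 3 + 1 - 1) (nn - 1) = (((nn / 3 : Nat) : Int) + 1 - 1).toNat := by omega
    have e2 : min (2 * nn / 3 + 1 - (nn / 3 + 1)) (nn - (nn / 3 + 1)) =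
        ((((2 * nn / 3 : Nat) : Int) + 1) - (((nn / 3 : Nat) : Int) + 1)).toNat := by omega
    have e3 : nn - (2 * nn / 3 + 1) = ((nn : Int) - (((2 * nn / 3 : Nat) : Int) + 1)).toNat := by omega
    rw [e1, e2, e3]
    simp [List.append_assoc]
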